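-- pv_equiv track=rewrite | github.com/shuchismita-anwar/CSE-763-Project | dna_baselines.py | find_variant_center
-- ===== SOURCE A (Python) =====
-- def find_variant_center(ref: str, alt: str) -> int:
--     if not ref or not alt:
--         return 0
--     if len(ref) == len(alt):
--         diffs = [i for i, (a, b) in enumerate(zip(ref, alt)) if a != b]
--         if diffs:
--             return (diffs[0] + diffs[-1]) // 2
--         return len(ref) // 2
--
--     min_len = min(len(ref), len(alt))
--     start = None
--     for i in range(min_len):
--         if ref[i] != alt[i]:
--             start = i
--             break
--     if start is None:
--         start = min_len
--
--     end_from_end = None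
--     ref_rev = ref[::-1]
--     alt_rev = alt[::-1]
--     for i in range(min_len):
--         if ref_rev[i] != alt_rev[i]:
--             end_from_end = i
--             break
--     if end_from_end is None:
--         end_from_end = 0
--     end = max(len(ref) - end_from_end - 1, start)
--     return (start + end) // 2
-- ===== SOURCE B (Python) =====
-- # B: one forward pass over the overlap with two accumulators (first front-aligned
-- # mismatch; ref-position of the last end-aligned mismatch, initially ref's last
-- # position) and a single unified midpoint formula -- no reversal, no break-loops,
-- # no separate equal-length scan.
-- def find_variant_center(ref: str, alt: str) -> int:
--     if not ref or not alt:
--         return 0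
--     n, m = len(ref), len(alt)
--     k = min(n, m)
--     first = k       # first mismatch comparing the strings front-aligned (k = none)
--     last = n - 1    # ref-position of the last mismatch comparing them end-aligned
--     for j in range(k):
--         if first == k and ref[j] != alt[j]:
--             first = j
--         if ref[n - k + j] != alt[m - k + j]:
--             last = n - k + j
--     if n == m and first == n:
--         return n // 2
--     return (first + max(last, first)) // 2
-- ===== Notes on version B (the rewrite author's own statement) =====
-- stated objective: simpler
-- what changed: A's three staged scans (an equal-length diff-index comprehension plus two separate break-loops over the string and its reversal with None sentinels) are replaced by one forward pass over the overlap that maintains two accumulators (first front-aligned mismatch, ref-position of the last end-aligned mismatch) and one unified midpoint formula, with no string reversal and no per-length-case scanning.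
import Mathlib
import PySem

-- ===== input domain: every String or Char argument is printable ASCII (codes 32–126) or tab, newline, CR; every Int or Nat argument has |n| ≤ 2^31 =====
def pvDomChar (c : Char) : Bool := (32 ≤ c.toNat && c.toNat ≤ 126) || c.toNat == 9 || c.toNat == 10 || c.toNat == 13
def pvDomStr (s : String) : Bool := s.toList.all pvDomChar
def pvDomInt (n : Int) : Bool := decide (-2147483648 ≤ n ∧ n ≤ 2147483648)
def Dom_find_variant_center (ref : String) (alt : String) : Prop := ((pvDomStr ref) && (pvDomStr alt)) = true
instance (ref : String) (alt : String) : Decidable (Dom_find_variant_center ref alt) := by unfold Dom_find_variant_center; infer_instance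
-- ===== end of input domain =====

-- B replaces A's three staged scans (equal-length diff comprehension + two break-loops
-- over the string and its reversal) by ONE forward pass over the overlap with two
-- accumulators and a unified midpoint formula (objective: simpler; same return value).

-- ===== PORT A =====
-- the 'for i in range(min_len): if r[i] != a[i]: start = i; break' loops of A
def pvFirstDiff : List Char → List Char → Option Nat
  | x :: xs, y :: ys => if x ≠ y then some 0 else (pvFirstDiff xs ys).map (· + 1)
  | _, _ => none

-- the comprehension 'diffs = [i for i, (a, b) in enumerate(zip(ref, alt)) if a != b]'
-- (s is enumerate's start, 0 at the call site; kept as a parameter for the proofs below)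
def pvDl (s : Int) (r a : List Char) : List Int :=
  ((PySem.List.enumerate (r.zip a) s).filter (fun q => q.2.1 ≠ q.2.2)).map Prod.fst

def find_variant_center (ref : String) (alt : String) : Int :=
  if ref.toList = [] ∨ alt.toList = [] then 0
  else if ref.toList.length = alt.toList.length then
    if (pvDl 0 ref.toList alt.toList).isEmpty then
      PySem.Int.floordiv (ref.toList.length : Int) 2
    else  -- diffs[0], diffs[-1]: safe under the nonempty guard
      PySem.Int.floordiv
        ((pvDl 0 ref.toList alt.toList).headD 0 + (pvDl 0 ref.toList alt.toList).getLastD 0) 2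
  else
    PySem.Int.floordiv
      ((((pvFirstDiff ref.toList alt.toList).getD (min ref.toList.length alt.toList.length) : Nat) : Int) +
        max ((ref.toList.length : Int) -
              (((pvFirstDiff ref.toList.reverse alt.toList.reverse).getD 0 : Nat) : Int) - 1)
          (((pvFirstDiff ref.toList alt.toList).getD (min ref.toList.length alt.toList.length) : Nat) : Int)) 2

-- ===== PORT B =====
-- Source B's single 'for j in range(k)' loop with its two accumulators (first, last);
-- the range bound is a parameter t (the port calls it with t = k) so the proofs can
-- induct on it; in-range indexing r[j] is ported as getD (all indices are < length).
def pvLoopB (r a : List Char) (n m k t : Nat) : Nat × Nat :=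
  (List.range t).foldl (fun st j =>
    ((if st.1 = k ∧ r.getD j ' ' ≠ a.getD j ' ' then j else st.1),
     (if r.getD (n - k + j) ' ' ≠ a.getD (m - k + j) ' ' then n - k + j else st.2)))
    (k, n - 1)

def find_variant_center_alt (ref : String) (alt : String) : Int :=
  if ref.toList = [] ∨ alt.toList = [] then 0
  else if ref.toList.length = alt.toList.length ∧
      (pvLoopB ref.toList alt.toList ref.toList.length alt.toList.length
        (min ref.toList.length alt.toList.length)
        (min ref.toList.length alt.toList.length)).1 = ref.toList.length then
    PySem.Int.floordiv (ref.toList.length : Int) 2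
  else
    PySem.Int.floordiv
      ((((pvLoopB ref.toList alt.toList ref.toList.length alt.toList.length
            (min ref.toList.length alt.toList.length)
            (min ref.toList.length alt.toList.length)).1 : Nat) : Int) +
        max (((pvLoopB ref.toList alt.toList ref.toList.length alt.toList.length
            (min ref.toList.length alt.toList.length)
            (min ref.toList.length alt.toList.length)).2 : Nat) : Int)
          (((pvLoopB ref.toList alt.toList ref.toList.length alt.toList.length
            (min ref.toList.length alt.toList.length)
            (min ref.toList.length alt.toList.length)).1 : Nat) : Int)) 2

-- ===== PRECONDITION & SPEC =====
def Spec_find_variant_center (ref : String) (alt : String) (out : Int) : Prop := out = find_variant_center_alt ref alt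
instance (ref : String) (alt : String) (out : Int) : Decidable (Spec_find_variant_center ref alt out) := by unfold Spec_find_variant_center; infer_instance

-- ===== CLAIM (what is proved, stated in full; the proofs are below) =====
def Claim_equal_find_variant_center : Prop := ∀ (ref : String) (alt : String), Dom_find_variant_center ref alt → Spec_find_variant_center ref alt (find_variant_center ref alt)

-- ===== LEMMAS AND PROOFS =====

-- common-prefix length: the proofs' measuring stick for both programs
def pvCpl : List Char → List Char → Nat
  | x :: xs, y :: ys => if x = y then pvCpl xs ys + 1 else 0
  | _, _ => 0

theorem pvCpl_le_left (r a : List Char) : pvCpl r a ≤ r.length := by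
  induction r generalizing a with
  | nil => cases a <;> simp [pvCpl]
  | cons x xs ih =>
    cases a with
    | nil => simp [pvCpl]
    | cons y ys =>
      simp only [pvCpl, List.length_cons]
      split_ifs with h
      · have := ih ys; omega
      · omega

theorem pvCpl_le_right (r a : List Char) : pvCpl r a ≤ a.length := by
  induction r generalizing a with
  | nil => cases a <;> simp [pvCpl]
  | cons x xs ih =>
    cases a with
    | nil => simp [pvCpl]
    | cons y ys =>
      simp only [pvCpl, List.length_cons]
      split_ifs with h
      · have := ih ys; omega
      · omega

theorem pvCpl_self (r : List Char) : pvCpl r r = r.length := by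
  induction r with
  | nil => simp [pvCpl]
  | cons x xs ih => simp [pvCpl, ih]

theorem pvCpl_eq_length_iff (r a : List Char) (h : r.length = a.length) :
    pvCpl r a = r.length ↔ r = a := by
  induction r generalizing a with
  | nil => cases a <;> simp_all [pvCpl]
  | cons x xs ih =>
    cases a with
    | nil => simp_all
    | cons y ys =>
      simp only [List.length_cons] at h
      simp only [pvCpl, List.length_cons, List.cons.injEq]
      split_ifs with hx
      · have hxy := ih ys (show xs.length = ys.length by omega)
        constructor
        · intro hc
          exact ⟨hx, hxy.mp (by omega)⟩
        · intro hc
          have := hxy.mpr hc.2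
          omega
      · constructor
        · intro hc; exact hc.elim
        · rintro ⟨h1, h2⟩; exact absurd h1 hx

theorem pvCpl_lt_of_ne (r a : List Char) (h : r.length = a.length) (hne : r ≠ a) :
    pvCpl r a < r.length := by
  have h1 := pvCpl_le_left r a
  have h2 := (pvCpl_eq_length_iff r a h).not.mpr hne
  omega

theorem pvCpl_append_singleton (u v : List Char) (x y : Char) (h : u.length = v.length) :
    pvCpl (u ++ [x]) (v ++ [y]) =
      if u = v then u.length + (if x = y then 1 else 0) else pvCpl u v := by
  induction u generalizing v with
  | nil =>
    cases v with
    | nil => simp [pvCpl]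
    | cons b vs => simp at h
  | cons a us ih =>
    cases v with
    | nil => simp at h
    | cons b vs =>
      simp only [List.length_cons] at h
      simp only [List.cons_append, pvCpl, List.length_cons, List.cons.injEq]
      by_cases hab : a = b
      · subst hab
        rw [if_pos rfl, ih vs (by omega)]
        by_cases huv : us = vs
        · simp [huv]; omega
        · simp [huv]
      · simp [hab]

theorem pvFirstDiff_eq (r a : List Char) :
    pvFirstDiff r a =
      if pvCpl r a < min r.length a.length then some (pvCpl r a) else none := by
  induction r generalizing a with
  | nil => cases a <;> simp [pvFirstDiff, pvCpl]
  | cons x xs ih =>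
    cases a with
    | nil => simp [pvFirstDiff, pvCpl]
    | cons y ys =>
      by_cases hx : x = y
      · have h1 := pvCpl_le_left xs ys
        have h2 := pvCpl_le_right xs ys
        rw [show pvFirstDiff (x :: xs) (y :: ys) = (pvFirstDiff xs ys).map (· + 1) by
          simp [pvFirstDiff, hx]]
        rw [ih, show pvCpl (x :: xs) (y :: ys) = pvCpl xs ys + 1 by simp [pvCpl, hx]]
        rw [show min (x :: xs).length (y :: ys).length = min xs.length ys.length + 1 by
          simp [List.length_cons, Nat.succ_min_succ]]
        split_ifs with hA hB hB
        · simp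
        · omega
        · omega
        · rfl
      · rw [show pvFirstDiff (x :: xs) (y :: ys) = some 0 by simp [pvFirstDiff, hx]]
        rw [show pvCpl (x :: xs) (y :: ys) = 0 by simp [pvCpl, hx]]
        rw [if_pos (lt_min_iff.mpr ⟨by simp only [List.length_cons]; omega,
          by simp only [List.length_cons]; omega⟩)]

theorem pvDl_cons (s : Int) (x y : Char) (xs ys : List Char) :
    pvDl s (x :: xs) (y :: ys) =
      (if x = y then [] else [s]) ++ pvDl (s + 1) xs ys := by
  simp only [pvDl, List.zip_cons_cons, PySem.List.enumerate_cons, List.filter_cons]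
  by_cases h : x = y <;> simp [h]

theorem pvDl_head? (s : Int) (r a : List Char) (h : r.length = a.length) :
    (pvDl s r a).head? =
      if pvCpl r a < r.length then some (s + (pvCpl r a : Int)) else none := by
  induction r generalizing a s with
  | nil =>
    cases a with
    | nil => simp [pvDl, pvCpl]
    | cons y ys => simp at h
  | cons x xs ih =>
    cases a with
    | nil => simp at h
    | cons y ys =>
      simp only [List.length_cons] at h
      rw [pvDl_cons]
      by_cases hx : x = y
      · rw [if_pos hx, List.nil_append, ih (s + 1) ys (by omega)]
        have hle := pvCpl_le_left xs ys
        rw [show pvCpl (x :: xs) (y :: ys) = pvCpl xs ys + 1 by simp [pvCpl, hx]]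
        simp only [List.length_cons]
        split_ifs with h1 h2 h2
        · congr 1; push_cast; ring
        · omega
        · omega
        · rfl
      · rw [if_neg hx]
        rw [show pvCpl (x :: xs) (y :: ys) = 0 by simp [pvCpl, hx]]
        rw [if_pos (by simp only [List.length_cons]; omega)]
        simp

theorem pvDl_eq_nil_iff (s : Int) (r a : List Char) (h : r.length = a.length) :
    pvDl s r a = [] ↔ pvCpl r a = r.length := by
  have h1 := pvDl_head? s r a h
  constructor
  · intro hn
    by_contra hc
    have hlt : pvCpl r a < r.length := by have := pvCpl_le_left r a; omega
    rw [hn, if_pos hlt] at h1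
    simp at h1
  · intro hc
    rw [if_neg (by omega)] at h1
    exact List.head?_eq_none_iff.mp h1

theorem pvDl_getLast? (s : Int) (r a : List Char) (h : r.length = a.length) :
    (pvDl s r a).getLast? =
      if pvCpl r a < r.length then
        some (s + ((r.length - 1 - pvCpl r.reverse a.reverse : Nat) : Int))
      else none := by
  induction r generalizing a s with
  | nil =>
    cases a with
    | nil => simp [pvDl, pvCpl]
    | cons y ys => simp at h
  | cons x xs ih =>
    cases a with
    | nil => simp at h
    | cons y ys =>
      simp only [List.length_cons] at h
      rw [pvDl_cons]
      by_cases hxy : xs = ys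
      · subst hxy
        have hnil : pvDl (s + 1) xs xs = [] :=
          (pvDl_eq_nil_iff (s + 1) xs xs rfl).mpr (pvCpl_self xs)
        rw [hnil, List.append_nil]
        by_cases hx : x = y
        · rw [if_pos hx, if_neg (by simp [pvCpl, hx, pvCpl_self])]
          simp
        · rw [if_neg hx]
          have hcpl : pvCpl (x :: xs) (y :: xs) = 0 := by simp [pvCpl, hx]
          rw [if_pos (by simp only [hcpl, List.length_cons]; omega)]
          have hrev : pvCpl (x :: xs).reverse (y :: xs).reverse = xs.length := by
            simp only [List.reverse_cons]
            rw [pvCpl_append_singleton _ _ _ _ (by simp)]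
            simp [hx]
          rw [hrev]
          have hz : (x :: xs).length - 1 - xs.length = 0 := by
            simp only [List.length_cons]; omega
          rw [hz]
          simp
      · have hlt : pvCpl xs ys < xs.length := pvCpl_lt_of_ne xs ys (by omega) hxy
        have hrevne : xs.reverse ≠ ys.reverse := fun hc => hxy (by
          have := congrArg List.reverse hc; simpa using this)
        have hrevlt : pvCpl xs.reverse ys.reverse < xs.length := by
          have := pvCpl_lt_of_ne xs.reverse ys.reverse
            (by simp only [List.length_reverse]; omega) hrevne
          simpa using this
        have hne : pvDl (s + 1) xs ys ≠ [] := by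
          rw [Ne, pvDl_eq_nil_iff (s + 1) xs ys (by omega)]; omega
        rw [List.getLast?_append_of_ne_nil _ hne, ih (s + 1) ys (by omega)]
        rw [if_pos hlt]
        have hrev : pvCpl (x :: xs).reverse (y :: ys).reverse = pvCpl xs.reverse ys.reverse := by
          simp only [List.reverse_cons]
          rw [pvCpl_append_singleton _ _ _ _ (by simp only [List.length_reverse]; omega)]
          simp [hrevne]
        rw [hrev]
        have hcpl_lt : pvCpl (x :: xs) (y :: ys) < (x :: xs).length := by
          simp only [pvCpl, List.length_cons]
          split_ifs <;> omega
        rw [if_pos hcpl_lt]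
        simp only [List.length_cons]
        congr 1
        omega

theorem pvCpl_spec_prefix (r a : List Char) (i : Nat) (hi : i < pvCpl r a) :
    r[i]? = a[i]? := by
  induction r generalizing a i with
  | nil => simp [pvCpl] at hi
  | cons x xs ih =>
    cases a with
    | nil => simp [pvCpl] at hi
    | cons y ys =>
      simp only [pvCpl] at hi
      by_cases hx : x = y
      · rw [if_pos hx] at hi
        cases i with
        | zero => simp [hx]
        | succ j => simpa using ih ys j (by omega)
      · rw [if_neg hx] at hi; omega

theorem pvCpl_spec_mismatch (r a : List Char) (h1 : pvCpl r a < r.length)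
    (h2 : pvCpl r a < a.length) : r[pvCpl r a]? ≠ a[pvCpl r a]? := by
  induction r generalizing a with
  | nil => simp at h1
  | cons x xs ih =>
    cases a with
    | nil => simp at h2
    | cons y ys =>
      by_cases hx : x = y
      · rw [show pvCpl (x :: xs) (y :: ys) = pvCpl xs ys + 1 by simp [pvCpl, hx]] at h1 h2 ⊢
        simp only [List.length_cons] at h1 h2
        simpa using ih ys (by omega) (by omega)
      · rw [show pvCpl (x :: xs) (y :: ys) = 0 by simp [pvCpl, hx]]
        simpa using hx

theorem pvCpl_add_rev_le (r a : List Char) (h : r.length = a.length)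
    (hlt : pvCpl r a < r.length) :
    pvCpl r a + pvCpl r.reverse a.reverse ≤ r.length - 1 := by
  set p := pvCpl r a with hp
  by_contra hc
  have hs2 : r.length - 1 - p < pvCpl r.reverse a.reverse := by omega
  have hget := pvCpl_spec_prefix r.reverse a.reverse (r.length - 1 - p) hs2
  rw [List.getElem?_reverse (by omega)] at hget
  rw [List.getElem?_reverse (by omega)] at hget
  have e1 : r.length - 1 - (r.length - 1 - p) = p := by omega
  have e2 : a.length - 1 - (r.length - 1 - p) = p := by omega
  rw [e1, e2] at hget
  exact pvCpl_spec_mismatch r a hlt (by omega) hget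

-- bridge: getD versus the getElem? facts above
theorem pvGetD_eq_of_get?_eq {r a : List Char} {i j : Nat} (h : r[i]? = a[j]?) :
    r.getD i ' ' = a.getD j ' ' := by
  simp [List.getD_eq_getElem?_getD, h]

theorem pvGetD_ne_of_get?_ne {r a : List Char} {i j : Nat}
    (hi : i < r.length) (hj : j < a.length) (h : r[i]? ≠ a[j]?) :
    r.getD i ' ' ≠ a.getD j ' ' := by
  rw [List.getD_eq_getElem?_getD, List.getD_eq_getElem?_getD,
    List.getElem?_eq_getElem hi, List.getElem?_eq_getElem hj]
  intro hc
  apply h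
  rw [List.getElem?_eq_getElem hi, List.getElem?_eq_getElem hj]
  simpa using hc

-- the end-aligned comparison of B's loop, read through the reversed strings
theorem pvTail_eq (r a : List Char) (k j : Nat) (hk1 : k ≤ r.length) (hk2 : k ≤ a.length)
    (hj : j < k) (hlt : k - 1 - j < pvCpl r.reverse a.reverse) :
    r.getD (r.length - k + j) ' ' = a.getD (a.length - k + j) ' ' := by
  have h := pvCpl_spec_prefix r.reverse a.reverse (k - 1 - j) hlt
  rw [List.getElem?_reverse (by omega), List.getElem?_reverse (by omega)] at h
  have e1 : r.length - 1 - (k - 1 - j) = r.length - k + j := by omega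
  have e2 : a.length - 1 - (k - 1 - j) = a.length - k + j := by omega
  rw [e1, e2] at h
  exact pvGetD_eq_of_get?_eq h

theorem pvTail_ne (r a : List Char) (k : Nat) (hk1 : k ≤ r.length) (hk2 : k ≤ a.length)
    (hs : pvCpl r.reverse a.reverse < k) :
    r.getD (r.length - k + (k - 1 - pvCpl r.reverse a.reverse)) ' ' ≠
      a.getD (a.length - k + (k - 1 - pvCpl r.reverse a.reverse)) ' ' := by
  set s := pvCpl r.reverse a.reverse with hsdef
  have h := pvCpl_spec_mismatch r.reverse a.reverse
    (by simp only [List.length_reverse]; omega) (by simp only [List.length_reverse]; omega)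
  rw [List.getElem?_reverse (by omega), List.getElem?_reverse (by omega)] at h
  have e1 : r.length - k + (k - 1 - s) = r.length - 1 - s := by omega
  have e2 : a.length - k + (k - 1 - s) = a.length - 1 - s := by omega
  rw [e1, e2]
  exact pvGetD_ne_of_get?_ne (by omega) (by omega) h

theorem pvLoopB_succ (r a : List Char) (n m k t : Nat) :
    pvLoopB r a n m k (t + 1) =
      ((if (pvLoopB r a n m k t).1 = k ∧ r.getD t ' ' ≠ a.getD t ' ' then t
        else (pvLoopB r a n m k t).1),
       (if r.getD (n - k + t) ' ' ≠ a.getD (m - k + t) ' ' then n - k + t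
        else (pvLoopB r a n m k t).2)) := by
  simp [pvLoopB, List.range_succ]

theorem pvLoopB_fst (r a : List Char) (k : Nat) (hk1 : k ≤ r.length) (hk2 : k ≤ a.length) :
    ∀ t, t ≤ k →
      (pvLoopB r a r.length a.length k t).1 = if pvCpl r a < t then pvCpl r a else k := by
  intro t
  induction t with
  | zero => intro _; simp [pvLoopB]
  | succ t ih =>
    intro ht
    have hp1 := pvCpl_le_left r a
    have hp2 := pvCpl_le_right r a
    rw [pvLoopB_succ]
    simp only
    rw [ih (by omega)]
    set p := pvCpl r a with hpdef
    by_cases hpt : p < t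
    · rw [if_pos hpt, if_neg (by rintro ⟨hc, -⟩; omega), if_pos (by omega)]
    · by_cases hpe : p = t
      · have hne : r.getD t ' ' ≠ a.getD t ' ' := by
          rw [← hpe]
          exact pvGetD_ne_of_get?_ne (by omega) (by omega)
            (pvCpl_spec_mismatch r a (by omega) (by omega))
        rw [if_neg hpt, if_pos ⟨rfl, hne⟩, if_pos (by omega), hpe]
      · have heq : r.getD t ' ' = a.getD t ' ' :=
          pvGetD_eq_of_get?_eq (pvCpl_spec_prefix r a t (by omega))
        rw [if_neg hpt, if_neg (by rintro ⟨-, hc⟩; exact hc heq), if_neg (by omega)]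

theorem pvLoopB_snd_none (r a : List Char) (k : Nat) (hk1 : k ≤ r.length) (hk2 : k ≤ a.length)
    (hs : k ≤ pvCpl r.reverse a.reverse) :
    ∀ t, t ≤ k → (pvLoopB r a r.length a.length k t).2 = r.length - 1 := by
  intro t
  induction t with
  | zero => intro _; simp [pvLoopB]
  | succ t ih =>
    intro ht
    rw [pvLoopB_succ]
    simp only
    have heq := pvTail_eq r a k t hk1 hk2 (by omega) (by omega)
    rw [if_neg (by intro hc; exact hc heq), ih (by omega)]

theorem pvLoopB_snd_found (r a : List Char) (k : Nat) (hk1 : k ≤ r.length) (hk2 : k ≤ a.length)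
    (hs : pvCpl r.reverse a.reverse < k) :
    ∀ t, t ≤ k → k - pvCpl r.reverse a.reverse ≤ t →
      (pvLoopB r a r.length a.length k t).2 = r.length - 1 - pvCpl r.reverse a.reverse := by
  intro t
  set s := pvCpl r.reverse a.reverse with hsdef
  induction t with
  | zero => intro _ hlo; omega
  | succ t ih =>
    intro ht hlo
    rw [pvLoopB_succ]
    simp only
    by_cases hcase : k - s ≤ t
    · have heq := pvTail_eq r a k t hk1 hk2 (by omega) (by omega)
      rw [if_neg (by intro hc; exact hc heq), ih (by omega) hcase]
    · have hte : t = k - 1 - s := by omega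
      have hne := pvTail_ne r a k hk1 hk2 hs
      rw [hte, if_pos hne]
      omega

theorem main_eq (ref alt : String) :
    find_variant_center ref alt = find_variant_center_alt ref alt := by
  unfold find_variant_center find_variant_center_alt
  generalize ref.toList = r
  generalize alt.toList = a
  by_cases hemp : r = [] ∨ a = []
  · rw [if_pos hemp, if_pos hemp]
  · have hrne : r ≠ [] := fun hc => hemp (Or.inl hc)
    have hane : a ≠ [] := fun hc => hemp (Or.inr hc)
    have hr1 : 1 ≤ r.length := List.length_pos_iff.mpr hrne
    have ha1 : 1 ≤ a.length := List.length_pos_iff.mpr hane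
    set k := min r.length a.length with hkdef
    have hk1 : k ≤ r.length := Nat.min_le_left _ _
    have hk2 : k ≤ a.length := Nat.min_le_right _ _
    have hp1 := pvCpl_le_left r a
    have hp2 := pvCpl_le_right r a
    have hfst := pvLoopB_fst r a k hk1 hk2 k (le_refl k)
    by_cases hlen : r.length = a.length
    · have hkn : k = r.length := by omega
      by_cases heq : r = a
      · -- identical strings of equal length: both return len // 2
        have hpn : pvCpl r a = r.length := (pvCpl_eq_length_iff r a hlen).mpr heq
        have hnil : pvDl 0 r a = [] := (pvDl_eq_nil_iff 0 r a hlen).mpr hpn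
        rw [if_neg hemp, if_pos hlen,
          if_pos (show (pvDl 0 r a).isEmpty = true by simp [hnil]),
          if_neg hemp,
          if_pos ⟨hlen, by rw [hfst, if_neg (by omega), hkn]⟩]
      · -- equal length with a difference
        have hp : pvCpl r a < r.length := pvCpl_lt_of_ne r a hlen heq
        have hrevne : r.reverse ≠ a.reverse := fun hc => heq (by
          have := congrArg List.reverse hc; simpa using this)
        have hs : pvCpl r.reverse a.reverse < r.length := by
          have := pvCpl_lt_of_ne r.reverse a.reverse (by simp [hlen]) hrevne
          simpa using this
        have hps := pvCpl_add_rev_le r a hlen hp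
        have hnn : pvDl 0 r a ≠ [] := by
          rw [Ne, pvDl_eq_nil_iff 0 r a hlen]; omega
        have hsnd := pvLoopB_snd_found r a k hk1 hk2 (by omega) k (le_refl k) (by omega)
        rw [if_neg hemp, if_pos hlen,
          if_neg (show ¬((pvDl 0 r a).isEmpty = true) by
            simp only [List.isEmpty_iff]; exact hnn),
          if_neg hemp,
          if_neg (show ¬(r.length = a.length ∧
              (pvLoopB r a r.length a.length k k).1 = r.length) by
            rintro ⟨-, hc⟩; rw [hfst, if_pos (by omega)] at hc; omega)]
        have hh := pvDl_head? 0 r a hlen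
        have hl := pvDl_getLast? 0 r a hlen
        rw [if_pos hp] at hh hl
        rw [List.headD_eq_head?_getD, hh, List.getLastD_eq_getLast?, hl]
        simp only [Option.getD_some]
        rw [hfst, if_pos (by omega), hsnd]
        congr 1
        rw [max_eq_left (by omega)]
        omega
    · -- unequal lengths
      have hgf : ¬(r.length = a.length ∧
          (pvLoopB r a r.length a.length k k).1 = r.length) := fun hc => hlen hc.1
      have hfd1 : (pvFirstDiff r a).getD k = pvCpl r a := by
        rw [pvFirstDiff_eq, ← hkdef]
        split_ifs with h
        · rfl
        · simp only [Option.getD_none]; omega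
      have hfd2 : (pvFirstDiff r.reverse a.reverse).getD 0 =
          if pvCpl r.reverse a.reverse < k then pvCpl r.reverse a.reverse else 0 := by
        rw [pvFirstDiff_eq]
        simp only [List.length_reverse]
        rw [← hkdef]
        split_ifs with h
        · rfl
        · rfl
      have hif : (if pvCpl r a < k then pvCpl r a else k) = pvCpl r a := by
        split_ifs with h
        · rfl
        · omega
      rw [if_neg hemp, if_neg hlen, if_neg hemp, if_neg hgf, hfd1, hfd2, hfst, hif]
      by_cases hs : pvCpl r.reverse a.reverse < k
      · rw [if_pos hs, pvLoopB_snd_found r a k hk1 hk2 hs k (le_refl k) (by omega)]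
        have he : ((r.length - 1 - pvCpl r.reverse a.reverse : Nat) : Int) =
            (r.length : Int) - (pvCpl r.reverse a.reverse : Int) - 1 := by omega
        rw [he]
      · rw [if_neg hs, pvLoopB_snd_none r a k hk1 hk2 (by omega) k (le_refl k)]
        have he : ((r.length - 1 : Nat) : Int) =
            (r.length : Int) - (((0 : Nat) : Nat) : Int) - 1 := by
          simp only [Nat.cast_zero]
          omega
        rw [he]

-- ===== VERDICT (by name: the statement is the Claim_ definition above) =====
theorem find_variant_center_spec : Claim_equal_find_variant_center := by
  intro ref alt _
  exact main_eq ref alt
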